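-- pv_equiv track=rewrite | github.com/pemodest0/Assyntrax | scripts/ops/build_daily_snapshot.py | _apply_hysteresis
-- ===== SOURCE A (Python) =====
-- def _apply_hysteresis(statuses: list[str], promote_days: int, degrade_days: int) -> list[str]:
--     if not statuses:
--         return statuses
--     order = {"inconclusive": 0, "watch": 1, "validated": 2}
--     out = [statuses[0]]
--     current = statuses[0]
--     candidate: str | None = None
--     streak = 0
--     for i in range(1, len(statuses)):
--         s = statuses[i]
--         if s == current:
--             candidate = None
--             streak = 0
--             out.append(current)
--             continue
--         if candidate != s:
--             candidate = s
--             streak = 1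
--         else:
--             streak += 1
--
--         need = promote_days if order.get(s, 0) > order.get(current, 0) else degrade_days
--         if streak >= max(1, need):
--             current = s
--             candidate = None
--             streak = 0
--         out.append(current)
--     return out
-- ===== SOURCE B (Python) =====
-- def _apply_hysteresis(statuses: list[str], promote_days: int, degrade_days: int) -> list[str]:
--     if not statuses:
--         return statuses
--     order = {"inconclusive": 0, "watch": 1, "validated": 2}
--     # decompose into maximal runs of identical consecutive values
--     runs = []
--     cur_v, cur_n = statuses[0], 0
--     for s in statuses:
--         if s == cur_v:
--             cur_n += 1
--         else:
--             runs.append((cur_v, cur_n))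
--             cur_v, cur_n = s, 1
--     runs.append((cur_v, cur_n))
--     out = []
--     current = statuses[0]
--     for v, L in runs:
--         if v == current:
--             out.extend([v] * L)
--         else:
--             need = promote_days if order.get(v, 0) > order.get(current, 0) else degrade_days
--             t = max(1, need)
--             k = min(t - 1, L)
--             out.extend([current] * k + [v] * (L - k))
--             if L >= t:
--                 current = v
--     return out
-- ===== Notes on version B (the rewrite author's own statement) =====
-- stated objective: alternative
-- what changed: Replaces A's per-element state machine (candidate/streak counters updated at every index) by a run-length decomposition: the sequence is first split into maximal runs of equal consecutive statuses, then each run is handled in one step, emitting min(threshold-1, run_length) copies of the old status followed by the new one and switching only when the run reaches the threshold.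
import Mathlib
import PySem

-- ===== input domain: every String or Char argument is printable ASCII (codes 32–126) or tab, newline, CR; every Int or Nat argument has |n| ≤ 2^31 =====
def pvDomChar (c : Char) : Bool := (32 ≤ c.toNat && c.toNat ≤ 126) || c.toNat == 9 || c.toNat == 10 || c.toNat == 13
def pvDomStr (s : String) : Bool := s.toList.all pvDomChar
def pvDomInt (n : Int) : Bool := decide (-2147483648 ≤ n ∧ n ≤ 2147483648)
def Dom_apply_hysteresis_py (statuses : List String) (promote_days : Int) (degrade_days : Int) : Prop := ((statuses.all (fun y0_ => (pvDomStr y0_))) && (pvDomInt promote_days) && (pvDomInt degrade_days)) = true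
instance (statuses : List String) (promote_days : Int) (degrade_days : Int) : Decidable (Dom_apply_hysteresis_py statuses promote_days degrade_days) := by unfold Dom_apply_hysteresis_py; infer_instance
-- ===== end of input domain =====

-- B replaces A's per-element candidate/streak state machine by a run-length decomposition
-- (maximal runs of equal consecutive statuses, each run handled in one step); objective: alternative decomposition, same cost.

-- ===== PORT A =====
-- literal transliteration of _apply_hysteresis: index loop over range(1, len), state (out, current, candidate, streak)
def apply_hysteresis_py (statuses : List String) (promote_days : Int) (degrade_days : Int) : List String :=
  if statuses = [] then statuses
  else
    let order : PySem.Dict String Int :=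
      PySem.Dict.ofList [("inconclusive", 0), ("watch", 1), ("validated", 2)]
    let first := PySem.List.pyGetD statuses 0 ""   -- statuses[0]; list nonempty here, so exact
    let fin := (PySem.List.pyRange 1 (PySem.List.len statuses) 1).foldl
      (fun (st : List String × String × Option String × Int) i =>
        let s := PySem.List.pyGetD statuses i ""   -- statuses[i]; i in range, so exact
        if s = st.2.1 then (st.1 ++ [st.2.1], st.2.1, none, 0)
        else
          let cs : Option String × Int :=
            if st.2.2.1 ≠ some s then (some s, 1) else (st.2.2.1, st.2.2.2 + 1)
          let need := if order.getD s 0 > order.getD st.2.1 0 then promote_days else degrade_days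
          if cs.2 ≥ max 1 need then (st.1 ++ [s], s, none, 0)
          else (st.1 ++ [st.2.1], st.2.1, cs.1, cs.2))
      ([first], first, none, 0)
    fin.1

-- ===== PORT B =====
-- literal transliteration of Source B: build maximal runs, then fold over the runs
def apply_hysteresis_py_alt (statuses : List String) (promote_days : Int) (degrade_days : Int) : List String :=
  match statuses with
  | [] => statuses
  | x :: _ =>
    let order : PySem.Dict String Int :=
      PySem.Dict.ofList [("inconclusive", 0), ("watch", 1), ("validated", 2)]
    let rstate := statuses.foldl
      (fun (st : List (String × Nat) × String × Nat) s =>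
        if s = st.2.1 then (st.1, st.2.1, st.2.2 + 1)
        else (st.1 ++ [(st.2.1, st.2.2)], s, 1))
      ([], x, 0)
    let runs := rstate.1 ++ [(rstate.2.1, rstate.2.2)]
    (runs.foldl
      (fun (st : List String × String) q =>
        if q.1 = st.2 then (st.1 ++ List.replicate q.2 q.1, st.2)
        else
          let need := if order.getD q.1 0 > order.getD st.2 0 then promote_days else degrade_days
          let t := max 1 need
          let k := min (t - 1) (q.2 : Int)
          (st.1 ++ List.replicate k.toNat st.2 ++ List.replicate ((q.2 : Int) - k).toNat q.1,
           if t ≤ (q.2 : Int) then q.1 else st.2))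
      ([], x)).1

-- ===== PRECONDITION & SPEC =====
def Spec_apply_hysteresis_py (statuses : List String) (promote_days : Int) (degrade_days : Int) (out : List String) : Prop := out = apply_hysteresis_py_alt statuses promote_days degrade_days
instance (statuses : List String) (promote_days : Int) (degrade_days : Int) (out : List String) : Decidable (Spec_apply_hysteresis_py statuses promote_days degrade_days out) := by unfold Spec_apply_hysteresis_py; infer_instance

-- ===== CLAIM (what is proved, stated in full; the proofs are below) =====
def Claim_equal_apply_hysteresis_py : Prop := ∀ (statuses : List String) (promote_days : Int) (degrade_days : Int), Dom_apply_hysteresis_py statuses promote_days degrade_days → Spec_apply_hysteresis_py statuses promote_days degrade_days (apply_hysteresis_py statuses promote_days degrade_days)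

-- ===== LEMMAS AND PROOFS =====

-- the status ranking and thresholds both programs share
def ordD (s : String) : Int :=
  (PySem.Dict.ofList [("inconclusive", (0:Int)), ("watch", 1), ("validated", 2)]).getD s 0

def needT (p d : Int) (v c : String) : Int := if ordD v > ordD c then p else d

def tT (p d : Int) (v c : String) : Int := max 1 (needT p d v c)

-- A's loop body, as a function of the incoming element
def stepA (p d : Int) (st : List String × String × Option String × Int) (s : String) :
    List String × String × Option String × Int :=
  if s = st.2.1 then (st.1 ++ [st.2.1], st.2.1, none, 0)
  else
    let cs : Option String × Int :=
      if st.2.2.1 ≠ some s then (some s, 1) else (st.2.2.1, st.2.2.2 + 1)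
    if cs.2 ≥ tT p d s st.2.1 then (st.1 ++ [s], s, none, 0)
    else (st.1 ++ [st.2.1], st.2.1, cs.1, cs.2)

-- B's run-building loop body and run-consuming loop body
def rStep (st : List (String × Nat) × String × Nat) (s : String) : List (String × Nat) × String × Nat :=
  if s = st.2.1 then (st.1, st.2.1, st.2.2 + 1)
  else (st.1 ++ [(st.2.1, st.2.2)], s, 1)

def stepB (p d : Int) (st : List String × String) (q : String × Nat) : List String × String :=
  if q.1 = st.2 then (st.1 ++ List.replicate q.2 q.1, st.2)
  else
    let t := tT p d q.1 st.2
    let k := min (t - 1) (q.2 : Int)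
    (st.1 ++ List.replicate k.toNat st.2 ++ List.replicate ((q.2 : Int) - k).toNat q.1,
     if t ≤ (q.2 : Int) then q.1 else st.2)

-- reference run decomposition (what B's run-building foldl computes)
def runsAux (v : String) (n : Nat) : List String → List (String × Nat)
  | [] => [(v, n)]
  | s :: l => if s = v then runsAux v (n + 1) l else (v, n) :: runsAux s 1 l

def flattenRuns (rs : List (String × Nat)) : List String :=
  rs.flatMap (fun q => List.replicate q.2 q.1)

def HeadNe (c : Option String) : List (String × Nat) → Prop
  | [] => True
  | q :: _ => c ≠ some q.1

def GoodRuns : List (String × Nat) → Prop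
  | [] => True
  | q :: rest => 1 ≤ q.2 ∧ HeadNe (some q.1) rest ∧ GoodRuns rest

-- port A unfolds to a plain foldl of stepA over the tail
theorem portA_foldl (x : String) (xs : List String) (p d : Int) :
    apply_hysteresis_py (x :: xs) p d = (xs.foldl (stepA p d) ([x], x, none, 0)).1 := by
  have h := PySem.List.foldl_pyRange_pyGetD (x :: xs) "" (stepA p d)
    (([x], x, none, (0:Int)) : List String × String × Option String × Int) (a := 1) (by omega)
  unfold apply_hysteresis_py
  rw [if_neg (List.cons_ne_nil x xs)]
  rw [PySem.List.pyGetD_zero_cons x xs ""]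
  show (List.foldl (fun acc j => stepA p d acc (PySem.List.pyGetD (x :: xs) j ""))
      ([x], x, none, (0:Int)) (PySem.List.pyRange 1 (PySem.List.len (x :: xs)))).1
    = (xs.foldl (stepA p d) ([x], x, none, 0)).1
  rw [h]
  simp

-- port B unfolds to a foldl of stepB over runsAux
theorem rsteps_eq (l : List String) : ∀ (rs : List (String × Nat)) (v : String) (n : Nat),
    (l.foldl rStep (rs, v, n)).1 ++ [((l.foldl rStep (rs, v, n)).2.1, (l.foldl rStep (rs, v, n)).2.2)]
      = rs ++ runsAux v n l := by
  induction l with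
  | nil => intro rs v n; simp [runsAux]
  | cons s l ih =>
    intro rs v n
    by_cases hs : s = v
    · subst hs; simp only [List.foldl_cons, rStep, runsAux]
      exact ih rs s (n + 1)
    · simp only [List.foldl_cons, rStep, runsAux, if_neg hs]
      rw [ih (rs ++ [(v, n)]) s 1]; simp

theorem portB_foldl (x : String) (xs : List String) (p d : Int) :
    apply_hysteresis_py_alt (x :: xs) p d = ((runsAux x 1 xs).foldl (stepB p d) ([], x)).1 := by
  have h := rsteps_eq (x :: xs) [] x 0
  simp only [List.nil_append] at h
  rw [show runsAux x 0 (x :: xs) = runsAux x 1 xs from by simp [runsAux]] at h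
  show ((((x :: xs).foldl rStep ([], x, 0)).1
      ++ [(((x :: xs).foldl rStep ([], x, 0)).2.1, ((x :: xs).foldl rStep ([], x, 0)).2.2)]).foldl
        (stepB p d) ([], x)).1 = ((runsAux x 1 xs).foldl (stepB p d) ([], x)).1
  rw [h]

theorem flatten_runsAux (l : List String) : ∀ (v : String) (n : Nat),
    flattenRuns (runsAux v n l) = List.replicate n v ++ l := by
  induction l with
  | nil => intro v n; simp [runsAux, flattenRuns]
  | cons s l ih =>
    intro v n
    by_cases hs : s = v
    · subst hs
      rw [show runsAux s n (s :: l) = runsAux s (n + 1) l from by simp [runsAux]]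
      rw [ih s (n + 1), List.replicate_succ']
      simp
    · simp only [runsAux, if_neg hs, flattenRuns, List.flatMap_cons]
      rw [show (runsAux s 1 l).flatMap (fun q => List.replicate q.2 q.1) = flattenRuns (runsAux s 1 l) from rfl, ih]
      simp

theorem runsAux_headNe (l : List String) : ∀ (v w : String) (n : Nat), w ≠ v → HeadNe (some w) (runsAux v n l) := by
  induction l with
  | nil => intro v w n h; simpa [runsAux, HeadNe] using h
  | cons s l ih =>
    intro v w n h
    by_cases hs : s = v
    · subst hs; simpa [runsAux] using ih s w (n + 1) h
    · simpa [runsAux, hs, HeadNe] using h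

theorem good_runsAux (l : List String) : ∀ (v : String) (n : Nat), 1 ≤ n → GoodRuns (runsAux v n l) := by
  induction l with
  | nil => intro v n hn; simp [runsAux, GoodRuns, HeadNe, hn]
  | cons s l ih =>
    intro v n hn
    by_cases hs : s = v
    · subst hs; simpa [runsAux] using ih s (n + 1) (by omega)
    · refine by simpa [runsAux, hs, GoodRuns, hn] using ⟨runsAux_headNe l s v 1 (fun h => hs h.symm), ih s 1 le_rfl⟩

-- one A-step on the current status
theorem stepA_same (p d : Int) (out : List String) (current : String) (c : Option String) (k : Int) :
    stepA p d (out, current, c, k) current = (out ++ [current], current, none, 0) := by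
  simp [stepA]

-- one A-step on a different status, from a candidate other than it
theorem stepA_fresh (p d : Int) (out : List String) (current v : String) (c : Option String) (k : Int)
    (hv : v ≠ current) (hc : c ≠ some v) :
    stepA p d (out, current, c, k) v =
      (if (1:Int) ≥ tT p d v current then (out ++ [v], v, none, 0)
       else (out ++ [current], current, some v, 1)) := by
  simp [stepA, hv, hc]

-- one A-step on a different status that is already the candidate
theorem stepA_again (p d : Int) (out : List String) (current v : String) (j : Int)
    (hv : v ≠ current) :
    stepA p d (out, current, some v, j) v =
      (if j + 1 ≥ tT p d v current then (out ++ [v], v, none, 0)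
       else (out ++ [current], current, some v, j + 1)) := by
  simp [stepA, hv]

-- running A over a run of the current status
theorem run_same (p d : Int) (current : String) : ∀ (L : Nat) (out : List String),
    (List.replicate L current).foldl (stepA p d) (out, current, none, (0:Int))
      = (out ++ List.replicate L current, current, none, 0) := by
  intro L
  induction L with
  | zero => intro out; simp
  | succ L ih =>
    intro out
    simp only [List.replicate_succ, List.foldl_cons, stepA_same]
    rw [ih (out ++ [current])]
    simp

-- running A over the remainder of a run of a different status, j elements already seen
theorem run_diff_from (p d : Int) (v current : String) (hv : v ≠ current) :
    ∀ (L : Nat) (j : Int) (out : List String), 1 ≤ j → j < tT p d v current →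
    (List.replicate L v).foldl (stepA p d) (out, current, some v, j)
      = if tT p d v current ≤ j + L then
          (out ++ List.replicate (tT p d v current - 1 - j).toNat current
               ++ List.replicate ((L : Int) - (tT p d v current - 1 - j)).toNat v, v, none, 0)
        else (out ++ List.replicate L current, current, some v, j + L) := by
  intro L
  induction L with
  | zero =>
    intro j out h1 h2
    rw [if_neg (by push_cast; omega)]
    simp
  | succ L ih =>
    intro j out h1 h2
    simp only [List.replicate_succ, List.foldl_cons, stepA_again p d out current v j hv]
    by_cases hsw : j + 1 ≥ tT p d v current
    · have ht : tT p d v current = j + 1 := by omega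
      rw [if_pos hsw, run_same p d v L (out ++ [v])]
      rw [if_pos (by push_cast; omega)]
      have e0 : (tT p d v current - 1 - j).toNat = 0 := by omega
      have e1 : ((↑(L + 1) : Int) - (tT p d v current - 1 - j)).toNat = L + 1 := by push_cast; omega
      rw [e0, e1]
      simp [List.replicate_succ]
    · rw [if_neg hsw, ih (j + 1) (out ++ [current]) (by omega) (by omega)]
      by_cases hc : tT p d v current ≤ j + 1 + L
      · rw [if_pos hc, if_pos (by push_cast at hc ⊢; omega)]
        have h3 : (tT p d v current - 1 - j).toNat = (tT p d v current - 1 - (j + 1)).toNat + 1 := by omega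
        have h4 : ((L : Int) - (tT p d v current - 1 - (j + 1))) = ((↑(L + 1) : Int) - (tT p d v current - 1 - j)) := by push_cast; ring
        rw [h3, h4]
        simp [List.replicate_succ]
      · rw [if_neg hc, if_neg (by push_cast at hc ⊢; omega)]
        have hl : (out ++ [current]) ++ List.replicate L current = out ++ List.replicate (L + 1) current := by
          simp [List.replicate_succ]
        have hk : j + 1 + (L : Int) = j + ((L + 1 : Nat) : Int) := by push_cast; ring
        rw [hl, hk]
        simp [List.replicate_succ]

-- running A over a whole run of a different status, from a candidate other than v
theorem run_diff (p d : Int) (v current : String) (hv : v ≠ current) :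
    ∀ (L : Nat) (out : List String) (c : Option String) (k : Int), c ≠ some v →
    (List.replicate (L + 1) v).foldl (stepA p d) (out, current, c, k)
      = if tT p d v current ≤ ((L + 1 : Nat) : Int) then
          (out ++ List.replicate (tT p d v current - 1).toNat current
               ++ List.replicate (((L + 1 : Nat) : Int) - (tT p d v current - 1)).toNat v, v, none, 0)
        else (out ++ List.replicate (L + 1) current, current, some v, ((L + 1 : Nat) : Int)) := by
  intro L out c k hc
  have ht1 : (1:Int) ≤ tT p d v current := le_max_left _ _
  simp only [List.replicate_succ, List.foldl_cons, stepA_fresh p d out current v c k hv hc]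
  by_cases h1 : (1 : Int) ≥ tT p d v current
  · have ht : tT p d v current = 1 := by omega
    rw [if_pos h1, run_same p d v L (out ++ [v]), if_pos (by push_cast; omega)]
    have e0 : (tT p d v current - 1).toNat = 0 := by omega
    have e1 : (((L + 1 : Nat) : Int) - (tT p d v current - 1)).toNat = L + 1 := by push_cast; omega
    rw [e0, e1]
    simp [List.replicate_succ]
  · rw [if_neg h1, run_diff_from p d v current hv L 1 (out ++ [current]) le_rfl (by omega)]
    by_cases hsw : tT p d v current ≤ 1 + (L : Int)
    · rw [if_pos (by omega), if_pos (by push_cast; omega)]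
      have h3 : (tT p d v current - 1).toNat = (tT p d v current - 1 - 1).toNat + 1 := by omega
      have h4 : ((L : Int) - (tT p d v current - 1 - 1)) = (((L + 1 : Nat) : Int) - (tT p d v current - 1)) := by push_cast; ring
      rw [h3, h4]
      simp [List.replicate_succ]
    · rw [if_neg (by omega), if_neg (by push_cast; omega)]
      have hl : (out ++ [current]) ++ List.replicate L current = out ++ List.replicate (L + 1) current := by
        simp [List.replicate_succ]
      have hk : (1 : Int) + (L : Int) = ((L + 1 : Nat) : Int) := by push_cast; ring
      rw [hl, hk]
      simp [List.replicate_succ]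

-- one B-step on the current status
theorem stepB_same (p d : Int) (out : List String) (current : String) (m : Nat) :
    stepB p d (out, current) (current, m) = (out ++ List.replicate m current, current) := by
  simp [stepB]

-- one B-step on a different status
theorem stepB_diff (p d : Int) (out : List String) (current v : String) (m : Nat) (hv : v ≠ current) :
    stepB p d (out, current) (v, m)
      = (out ++ List.replicate (min (tT p d v current - 1) (m : Int)).toNat current
             ++ List.replicate ((m : Int) - min (tT p d v current - 1) (m : Int)).toNat v,
         if tT p d v current ≤ (m : Int) then v else current) := by
  simp [stepB, tT, needT, ordD, hv]

-- the simulation: A element by element over the flattened runs = B run by run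
theorem sim (p d : Int) : ∀ (rs : List (String × Nat)), GoodRuns rs →
    ∀ (out : List String) (current : String) (c : Option String) (k : Int), HeadNe c rs →
    ((flattenRuns rs).foldl (stepA p d) (out, current, c, k)).1
      = (rs.foldl (stepB p d) (out, current)).1 := by
  intro rs
  induction rs with
  | nil => intro _ out current c k _; simp [flattenRuns]
  | cons q rest ih =>
    intro hg out current c k hc
    obtain ⟨v, m⟩ := q
    obtain ⟨hm, hnext, hrest⟩ := hg
    simp only [flattenRuns, List.flatMap_cons, List.foldl_append, List.foldl_cons] at *
    obtain ⟨m', rfl⟩ : ∃ m', m = m' + 1 := ⟨m - 1, by omega⟩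
    by_cases hvc : v = current
    · subst hvc
      have hA : (List.replicate (m' + 1) v).foldl (stepA p d) (out, v, c, k)
          = (out ++ List.replicate (m' + 1) v, v, none, 0) := by
        simp only [List.replicate_succ, List.foldl_cons, stepA_same]
        rw [run_same p d v m' (out ++ [v])]
        simp
      rw [hA, stepB_same]
      exact ih hrest (out ++ List.replicate (m' + 1) v) v none 0 (by cases rest <;> simp [HeadNe])
    · have hcne : c ≠ some v := by simpa [HeadNe] using hc
      rw [run_diff p d v current hvc m' out c k hcne, stepB_diff p d out current v (m' + 1) hvc]
      have ht1 : (1:Int) ≤ tT p d v current := le_max_left _ _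
      by_cases hsw : tT p d v current ≤ ((m' + 1 : Nat) : Int)
      · rw [if_pos hsw, if_pos hsw]
        have hmin : min (tT p d v current - 1) ((m' + 1 : Nat) : Int) = tT p d v current - 1 := by
          push_cast at hsw ⊢; omega
        rw [hmin]
        exact ih hrest _ v none 0 (by cases rest <;> simp [HeadNe])
      · rw [if_neg hsw, if_neg hsw]
        have hmin : min (tT p d v current - 1) ((m' + 1 : Nat) : Int) = ((m' + 1 : Nat) : Int) := by
          push_cast at hsw ⊢; omega
        rw [hmin]
        have e1 : (((m' + 1 : Nat) : Int)).toNat = m' + 1 := by push_cast; omega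
        have e2 : (((m' + 1 : Nat) : Int) - ((m' + 1 : Nat) : Int)).toNat = 0 := by push_cast; omega
        rw [e1, e2]
        simpa using ih hrest (out ++ List.replicate (m' + 1) current) current (some v) ((m' + 1 : Nat) : Int) hnext

-- ===== VERDICT (by name: the statement is the Claim_ definition above) =====
theorem apply_hysteresis_py_spec : Claim_equal_apply_hysteresis_py := by
  intro statuses p d _
  unfold Spec_apply_hysteresis_py
  cases statuses with
  | nil => rfl
  | cons x xs =>
    rw [portA_foldl, portB_foldl]
    have hA0 : (xs.foldl (stepA p d) ([x], x, none, (0:Int)))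
        = ((x :: xs).foldl (stepA p d) ([], x, none, 0)) := by
      simp [stepA_same]
    have hflat : flattenRuns (runsAux x 1 xs) = x :: xs := by
      rw [flatten_runsAux]; simp
    rw [hA0, ← hflat]
    exact sim p d (runsAux x 1 xs) (good_runsAux xs x 1 le_rfl) [] x none 0
      (by cases runsAux x 1 xs <;> simp [HeadNe])
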